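-- pv_equiv track=rewrite | github.com/JakubFlash/Advent2023 | d13_mirrors.py | list_row_discrepancies
-- ===== SOURCE A (Python) =====
-- def list_row_discrepancies(in_diagram : list[str]) -> list[list[int]]:
--     discrepancy_cts = []
--     # for each gap, note the discrepancy count
--     # smudges are in rows/columns with a total discrepancy count of 1
--
--     for gap_no in range(len(in_diagram)-1):
--         discrepancy_counter = 0
--         # verify refleciton around gap number gap_no
--         l_layers = gap_no + 1
--         r_layers = len(in_diagram) - (gap_no + 1)
--         layers_to_check = min(l_layers, r_layers)
--         for i in range(layers_to_check):
--             discrepancy_counter += sum(1 for a, b in zip(in_diagram[gap_no - i], in_diagram[gap_no + 1 + i]) if a != b)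
--         discrepancy_cts.append(discrepancy_counter)
--
--     return discrepancy_cts
-- ===== SOURCE B (Python) =====
-- def _row_diff(x, y):
--     return sum(1 for a, b in zip(x, y) if a != b)
--
-- def list_row_discrepancies(in_diagram : list[str]) -> list[list[int]]:
--     # sweep: keep the already-seen rows reversed in `left`; zip with the rest
--     out = []
--     left = []
--     rest = list(in_diagram)
--     while len(rest) > 1:
--         left.insert(0, rest.pop(0))
--         out.append(sum(_row_diff(x, y) for x, y in zip(left, rest)))
--     return out
-- ===== Notes on version B (the rewrite author's own statement) =====
-- stated objective: alternative
-- what changed: A gathers each gap's count by index arithmetic (min of layer counts, indexed access in_diagram[gap-i]/[gap+1+i]); B keeps a reversed prefix of seen rows and zips it with the remaining suffix at each step, so no indices or layer minima appear at all.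
import Mathlib
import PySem

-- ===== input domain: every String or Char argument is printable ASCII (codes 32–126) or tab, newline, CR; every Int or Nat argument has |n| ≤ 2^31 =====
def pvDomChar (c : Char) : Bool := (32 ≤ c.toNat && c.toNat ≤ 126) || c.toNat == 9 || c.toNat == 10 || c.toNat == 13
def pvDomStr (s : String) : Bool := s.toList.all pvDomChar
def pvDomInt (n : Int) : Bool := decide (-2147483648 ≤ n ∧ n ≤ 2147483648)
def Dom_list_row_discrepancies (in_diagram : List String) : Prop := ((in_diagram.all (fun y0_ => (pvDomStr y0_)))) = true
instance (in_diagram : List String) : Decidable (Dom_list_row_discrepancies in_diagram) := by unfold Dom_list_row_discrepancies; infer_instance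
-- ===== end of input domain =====

-- B replaces A's index-arithmetic gather (min of layer counts, in_diagram[gap-i]/[gap+1+i])
-- by a reversed-prefix/suffix sweep with zip; same cost, no index arithmetic (objective: alternative).


-- ===== PORT A =====
-- sum(1 for a, b in zip(s, t) if a != b)
def rowDiffA (s t : String) : Int :=
  (s.toList.zip t.toList).foldl (fun c p => if p.1 ≠ p.2 then c + 1 else c) 0

-- literal port of A; the indices gap-i and gap+1+i are always in range, so pyGetD's default is never used
def list_row_discrepancies (in_diagram : List String) : List Int :=
  (PySem.List.pyRange 0 ((in_diagram.length : Int) - 1) 1).foldl (fun acc gap =>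
    let l_layers : Int := gap + 1
    let r_layers : Int := (in_diagram.length : Int) - (gap + 1)
    let layers_to_check := min l_layers r_layers
    let discrepancy_counter :=
      (PySem.List.pyRange 0 layers_to_check 1).foldl (fun c i =>
        c + rowDiffA (PySem.List.pyGetD in_diagram (gap - i) "")
                     (PySem.List.pyGetD in_diagram (gap + 1 + i) "")) 0
    acc ++ [discrepancy_counter]) []

-- ===== PORT B =====
def rowDiffB (s t : String) : Int :=
  (s.toList.zip t.toList).foldl (fun c p => if p.1 ≠ p.2 then c + 1 else c) 0

-- the while-loop of Source B: left = reversed prefix, second argument = remaining rows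
def altGo : List String → List String → List Int
  | _, [] => []
  | _, [_] => []
  | left, r :: s :: rest =>
      (((r :: left).zip (s :: rest)).foldl (fun c p => c + rowDiffB p.1 p.2) 0)
        :: altGo (r :: left) (s :: rest)

def list_row_discrepancies_alt (in_diagram : List String) : List Int :=
  altGo [] in_diagram

-- ===== PRECONDITION & SPEC =====
def Spec_list_row_discrepancies (in_diagram : List String) (out : List Int) : Prop := out = list_row_discrepancies_alt in_diagram
instance (in_diagram : List String) (out : List Int) : Decidable (Spec_list_row_discrepancies in_diagram out) := by unfold Spec_list_row_discrepancies; infer_instance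

-- ===== CLAIM (what is proved, stated in full; the proofs are below) =====
def Claim_equal_list_row_discrepancies : Prop := ∀ (in_diagram : List String), Dom_list_row_discrepancies in_diagram → Spec_list_row_discrepancies in_diagram (list_row_discrepancies in_diagram)

-- ===== LEMMAS AND PROOFS =====

-- the common shape: for gap g, fold over the zip of the reversed (g+1)-prefix with the (g+1)-suffix
def gapSum (xs : List String) (g : Nat) : Int :=
  (((xs.take (g + 1)).reverse).zip (xs.drop (g + 1))).foldl
    (fun c p => c + rowDiffB p.1 p.2) 0

-- B unfolds to the map of gapSum over the gaps
theorem altGo_spec (rest left : List String) :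
    altGo left rest = (List.range (rest.length - 1)).map (fun j =>
      ((((rest.take (j + 1)).reverse ++ left).zip (rest.drop (j + 1))).foldl
        (fun c p => c + rowDiffB p.1 p.2) 0)) := by
  induction rest generalizing left with
  | nil => simp [altGo]
  | cons r rest ih =>
    cases rest with
    | nil => simp [altGo]
    | cons s rest' =>
      rw [altGo, ih (r :: left)]
      have hlen : (r :: s :: rest').length - 1 = ((s :: rest').length - 1) + 1 := by
        simp
      rw [hlen, List.range_succ_eq_map]
      simp [List.map_map, Function.comp]

theorem alt_eq_map_gapSum (xs : List String) :
    list_row_discrepancies_alt xs = (List.range (xs.length - 1)).map (gapSum xs) := by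
  rw [list_row_discrepancies_alt, altGo_spec]
  simp [gapSum]

-- the zip list for gap g, elementwise
theorem zip_pairs (xs : List String) (g : Nat) (hg : g < xs.length - 1) :
    ((xs.take (g + 1)).reverse).zip (xs.drop (g + 1)) =
      (List.range (min (g + 1) (xs.length - (g + 1)))).map
        (fun i => (xs.getD (g - i) "", xs.getD (g + 1 + i) "")) := by
  have hg1 : g + 1 ≤ xs.length := by omega
  apply List.ext_getElem
  · simp
  · intro i h1 h2
    have hi : i < min (g + 1) (xs.length - (g + 1)) := by
      simpa using h2
    have hi1 : i < g + 1 := lt_of_lt_of_le hi (min_le_left _ _)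
    have hi2 : g + 1 + i < xs.length := by
      have := lt_of_lt_of_le hi (min_le_right (g+1) (xs.length - (g + 1)))
      omega
    have hgi : g - i < xs.length := by omega
    simp [List.getElem_zip, List.getElem_reverse, List.getElem_take, List.getElem_drop,
      List.getD_eq_getElem?_getD, hgi, hi2]
    congr 1
    omega

-- A's inner indexed fold equals gapSum
theorem inner_eq_gapSum (xs : List String) (g : Nat) (hg : g < xs.length - 1) :
    (PySem.List.pyRange 0 (min ((g : Int) + 1) ((xs.length : Int) - ((g : Int) + 1))) 1).foldl
      (fun c i => c + rowDiffA (PySem.List.pyGetD xs ((g : Int) - i) "")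
                               (PySem.List.pyGetD xs ((g : Int) + 1 + i) "")) 0
      = gapSum xs g := by
  have hL : min ((g : Int) + 1) ((xs.length : Int) - ((g : Int) + 1))
      = ((min (g + 1) (xs.length - (g + 1)) : Nat) : Int) := by
    have h : g + 1 ≤ xs.length := by omega
    rw [Nat.cast_min]
    congr 1
    omega
  rw [hL, PySem.List.pyRange_zero_natCast, List.foldl_map]
  rw [gapSum, zip_pairs xs g hg, List.foldl_map]
  apply PySem.List.foldl_congr_mem
  intro c i hi
  have hi' : i < min (g + 1) (xs.length - (g + 1)) := by
    simpa using hi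
  have h1 : (g : Int) - (i : Int) = ((g - i : Nat) : Int) := by omega
  have h2 : (g : Int) + 1 + (i : Int) = ((g + 1 + i : Nat) : Int) := by omega
  simp only [h1, h2, PySem.List.pyGetD_natCast]
  rfl

theorem a_eq_map_gapSum (xs : List String) :
    list_row_discrepancies xs = (List.range (xs.length - 1)).map (gapSum xs) := by
  cases xs with
  | nil => rfl
  | cons x xs' =>
    have hn : ((List.length (x :: xs') : Int) - 1) = ((xs'.length : Nat) : Int) := by
      simp
    rw [list_row_discrepancies, hn, PySem.List.pyRange_zero_natCast]
    rw [List.foldl_map, PySem.List.foldl_append_singleton_eq_map]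
    have hlen : (x :: xs').length - 1 = xs'.length := by simp
    rw [hlen]
    apply List.map_congr_left
    intro g hgmem
    have hg : g < (x :: xs').length - 1 := by
      simpa [hlen] using List.mem_range.mp hgmem
    simpa using inner_eq_gapSum (x :: xs') g hg

-- ===== VERDICT (by name: the statement is the Claim_ definition above) =====
theorem list_row_discrepancies_spec : Claim_equal_list_row_discrepancies := by
  intro xs _
  unfold Spec_list_row_discrepancies
  rw [a_eq_map_gapSum, alt_eq_map_gapSum]
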